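-- pv_equiv track=rewrite | github.com/ahmadali-jamali/Puzzle-4-4-solving | Puzzle 4*4.py | position_finding
-- ===== SOURCE A (Python) =====
-- def position_finding(puzzle,f): #finding where can the 0 number move
--
--     position = []#up down left right
--     a = False
--     for i in range(4):
--         if a == False:
--             for j in range(4):
--                 if puzzle[i][j]==0:
--                     #up
--                     if i == 0:
--                         position.append(0)
--                     else:
--                         position.append(1)
--                     #down
--                     if i == 3:
--                         position.append(0)
--                     else:
--                         position.append(1)
--                     #left
--                     if j == 0:
--                         position.append(0)
--                     else:
--                         position.append(1)
--                     #right
--                     if j == 3: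
--                         position.append(0)
--                     else:
--                         position.append(1)
--                     a = True
--                     break
--     if f>=0:
--         position[f] = 0
--
--     return position
-- ===== SOURCE B (Python) =====
-- def position_finding(puzzle, f):
--     # Direction-predicate formulation: each of the four move flags is an
--     # independent boundary/membership test; the blank's (i, j) coordinates
--     # are never computed.
--     rows = [r[:4] for r in puzzle[:4]]
--     hits = [0 in r for r in rows]
--     position = []
--     if True in hits:
--         row = next(r for r in rows if 0 in r)
--         position = [int(not hits[0]),      # up: blank not in row 0
--                     int(True in hits[:3]), # down: blank within first three rows
--                     int(row[0] != 0),      # left: blank not in column 0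
--                     int(0 in row[:3])]     # right: blank within first three columns
--     if f >= 0:
--         position[f] = 0
--     return position
-- ===== Notes on version B (the rewrite author's own statement) =====
-- stated objective: alternative
-- what changed: Replaces A's nested row-major scan with a found-flag and four if/else appends by a direction-predicate formulation: each of the four move flags is an independent membership/boundary test (is the blank in row 0, within the first three rows, is the blank row's first cell the blank, is a 0 within its first three cells), without ever computing the blank's (i,j) coordinates.
import Mathlib
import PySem

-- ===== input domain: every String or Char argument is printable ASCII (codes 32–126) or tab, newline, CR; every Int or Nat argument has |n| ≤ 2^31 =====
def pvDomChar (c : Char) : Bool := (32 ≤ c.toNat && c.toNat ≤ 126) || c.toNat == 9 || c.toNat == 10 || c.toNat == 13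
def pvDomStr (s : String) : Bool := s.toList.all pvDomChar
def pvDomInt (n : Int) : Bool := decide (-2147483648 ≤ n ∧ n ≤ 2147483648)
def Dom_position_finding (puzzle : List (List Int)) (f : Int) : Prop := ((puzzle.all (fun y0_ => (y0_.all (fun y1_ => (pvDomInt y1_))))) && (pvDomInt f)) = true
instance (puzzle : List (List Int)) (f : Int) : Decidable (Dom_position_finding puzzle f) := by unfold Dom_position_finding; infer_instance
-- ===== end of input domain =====

-- B replaces A's nested scan-for-(i,j)-then-test-edges by four independent
-- direction predicates (membership/boundary tests); objective: alternative, same cost.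

-- ===== PORT A =====
-- inner loop over j = 0..3 with break at the first 0
def pfInner (i : Int) (row : List Int) (js : List Int) (st : List Int × Bool) : List Int × Bool :=
  match js with
  | [] => st
  | j :: rest =>
    if PySem.List.pyGetD row j 1 = 0 then
      (st.1 ++ [if i = 0 then 0 else 1] ++ [if i = 3 then 0 else 1]
            ++ [if j = 0 then 0 else 1] ++ [if j = 3 then 0 else 1], true)
    else pfInner i row rest st

-- outer loop over i = 0..3, skipped once the flag a (= st.2) is true
def pfOuter (puzzle : List (List Int)) (is : List Int) (st : List Int × Bool) : List Int × Bool :=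
  match is with
  | [] => st
  | i :: rest =>
      pfOuter puzzle rest
        (if st.2 = false then pfInner i (PySem.List.pyGetD puzzle i []) [0, 1, 2, 3] st else st)

def position_finding (puzzle : List (List Int)) (f : Int) : List Int :=
  let position := (pfOuter puzzle [0, 1, 2, 3] ([], false)).1
  if f ≥ 0 then PySem.List.pySetD position f 0 else position

-- ===== PORT B =====
def position_finding_alt (puzzle : List (List Int)) (f : Int) : List Int :=
  let rows := (puzzle.take 4).map (fun r => r.take 4)
  let hits := rows.map (fun r => r.contains 0)
  let position :=
    if hits.contains true then
      let row : List Int := (rows.find? (fun r => r.contains 0)).getD []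
      ([if hits.getD 0 false then 0 else 1,
        if (hits.take 3).contains true then 1 else 0,
        if row.getD 0 0 = 0 then 0 else 1,
        if (row.take 3).contains 0 then 1 else 0] : List Int)
    else []
  if f ≥ 0 then PySem.List.pySetD position f 0 else position

-- ===== PRECONDITION & SPEC =====
abbrev pvRowPasses (row : List Int) : Prop := 4 ≤ row.length ∧ (0 : Int) ∉ row.take 4
abbrev pvRowFinds (row : List Int) : Prop := (0 : Int) ∈ row.take 4

-- Pre_ holds exactly when Python A returns normally: the row-major scan reaches a 0
-- without an out-of-range access (every earlier row has ≥ 4 cells, none 0) and f < 4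
-- (position has 4 entries), or a full 4x4 window exists with no 0 and f < 0 (position
-- stays empty and is never indexed).
def Pre_position_finding (puzzle : List (List Int)) (f : Int) : Prop :=
  (∃ i, i < 4 ∧ i < puzzle.length ∧ pvRowFinds (puzzle.getD i []) ∧
      (∀ i' < i, pvRowPasses (puzzle.getD i' [])) ∧ f < 4)
  ∨ (4 ≤ puzzle.length ∧ (∀ i < 4, pvRowPasses (puzzle.getD i [])) ∧ f < 0)

instance (puzzle : List (List Int)) (f : Int) : Decidable (Pre_position_finding puzzle f) := by
  unfold Pre_position_finding; infer_instance

def pvWitness_position_finding : List (List Int) × Int :=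
  ([[1, 2, 3, 4], [5, 6, 0, 7], [8, 9, 10, 11], [12, 13, 14, 15]], 2)

def Spec_position_finding (puzzle : List (List Int)) (f : Int) (out : List Int) : Prop := out = position_finding_alt puzzle f
instance (puzzle : List (List Int)) (f : Int) (out : List Int) : Decidable (Spec_position_finding puzzle f out) := by unfold Spec_position_finding; infer_instance

-- ===== CLAIM (what is proved, stated in full; the proofs are below) =====
def Claim_equal_position_finding : Prop := ∀ (puzzle : List (List Int)) (f : Int), Dom_position_finding puzzle f → Pre_position_finding puzzle f → Spec_position_finding puzzle f (position_finding puzzle f)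

-- ===== LEMMAS AND PROOFS =====

-- an element strictly before the first occurrence of a differs from a
theorem pv_ne_of_lt_idxOf {l : List Int} {a : Int} {j : Nat}
    (h : j < List.idxOf a l) (hj : j < l.length) : l[j] ≠ a := by
  induction l generalizing j with
  | nil => simp at hj
  | cons x xs ih =>
    cases j with
    | zero =>
      intro he
      simp only [List.getElem_cons_zero] at he
      simp [he] at h
    | succ j' =>
      by_cases hx : x == a
      · simp [List.idxOf_cons, hx] at h
      · simp only [List.idxOf_cons, hx, cond_false] at h
        simpa using ih (by omega) (by simpa using hj)

theorem pv_take_elem (row : List Int) (j : Nat) (hj : j < (row.take 4).length) :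
    row[j]?.getD 1 = (row.take 4)[j] := by
  have hj' : j < row.length := lt_of_lt_of_le hj (by simp [List.length_take])
  rw [List.getElem?_eq_getElem hj', Option.getD_some, List.getElem_take]

theorem pv_row_get_ne (row : List Int) (hlen : 4 ≤ row.length)
    (hmem : (0 : Int) ∉ row.take 4) (j : Nat) (hj : j < 4) : row[j]?.getD 1 ≠ 0 := by
  have hjl : j < (row.take 4).length := by simp [List.length_take]; omega
  rw [pv_take_elem row j hjl]
  intro he
  exact hmem (he ▸ List.getElem_mem hjl)

theorem pv_inner_pass (i : Int) (row : List Int) (pos : List Int)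
    (hlen : 4 ≤ row.length) (hmem : (0 : Int) ∉ row.take 4) :
    pfInner i row [0, 1, 2, 3] (pos, false) = (pos, false) := by
  have h0 := pv_row_get_ne row hlen hmem 0 (by omega)
  have h1 := pv_row_get_ne row hlen hmem 1 (by omega)
  have h2 := pv_row_get_ne row hlen hmem 2 (by omega)
  have h3 := pv_row_get_ne row hlen hmem 3 (by omega)
  simp [pfInner, PySem.List.pyGetD_ofNat', List.getD_eq_getElem?_getD, h0, h1, h2, h3]

theorem pv_inner_find (i : Int) (row : List Int) (pos : List Int)
    (hmem : (0 : Int) ∈ row.take 4) :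
    pfInner i row [0, 1, 2, 3] (pos, false) =
      (pos ++ [if i = 0 then 0 else 1, if i = 3 then 0 else 1,
               if List.idxOf 0 (row.take 4) = 0 then 0 else 1,
               if List.idxOf 0 (row.take 4) = 3 then 0 else 1], true) := by
  have hlt : List.idxOf 0 (row.take 4) < (row.take 4).length := List.idxOf_lt_length_of_mem hmem
  have h4 : List.idxOf 0 (row.take 4) < 4 := lt_of_lt_of_le hlt (by simp [List.length_take])
  have hz : row[(List.idxOf 0 (row.take 4))]?.getD 1 = 0 := by
    rw [pv_take_elem _ _ hlt]; exact List.getElem_idxOf hlt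
  have hne : ∀ j : Nat, j < List.idxOf 0 (row.take 4) → row[j]?.getD 1 ≠ 0 := by
    intro j hjlt
    rw [pv_take_elem _ _ (lt_trans hjlt hlt)]
    exact pv_ne_of_lt_idxOf hjlt (lt_trans hjlt hlt)
  set k := List.idxOf 0 (row.take 4) with hk
  interval_cases k
  · simp [pfInner, PySem.List.pyGetD_ofNat', List.getD_eq_getElem?_getD, hz]
  · simp [pfInner, PySem.List.pyGetD_ofNat', List.getD_eq_getElem?_getD, hz, hne 0 (by omega)]
  · simp [pfInner, PySem.List.pyGetD_ofNat', List.getD_eq_getElem?_getD, hz,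
      hne 0 (by omega), hne 1 (by omega)]
  · simp [pfInner, PySem.List.pyGetD_ofNat', List.getD_eq_getElem?_getD, hz,
      hne 0 (by omega), hne 1 (by omega), hne 2 (by omega)]

theorem pv_outer_skip (puzzle : List (List Int)) (is : List Int) (pos : List Int) :
    pfOuter puzzle is (pos, true) = (pos, true) := by
  induction is with
  | nil => rfl
  | cons i rest ih => simp [pfOuter, ih]

theorem pv_outer_step (puzzle : List (List Int)) (i : Int) (rest : List Int)
    (st : List Int × Bool) (h : st.2 = false) :
    pfOuter puzzle (i :: rest) st =
      pfOuter puzzle rest (pfInner i (PySem.List.pyGetD puzzle i []) [0, 1, 2, 3] st) := by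
  simp [pfOuter, h]

theorem pv_outer_main (puzzle : List (List Int)) (i : Nat) (hi : i < 4)
    (hil : i < puzzle.length) (hfind : pvRowFinds (puzzle.getD i []))
    (hprev : ∀ i' < i, pvRowPasses (puzzle.getD i' [])) :
    (pfOuter puzzle [0, 1, 2, 3] ([], false)).1 =
      [if (i : Int) = 0 then 0 else 1, if (i : Int) = 3 then 0 else 1,
       if List.idxOf 0 ((puzzle.getD i []).take 4) = 0 then 0 else 1,
       if List.idxOf 0 ((puzzle.getD i []).take 4) = 3 then 0 else 1] := by
  have e0 : PySem.List.pyGetD puzzle (0 : Int) [] = puzzle.getD 0 [] :=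
    PySem.List.pyGetD_ofNat' puzzle 0 []
  have e1 : PySem.List.pyGetD puzzle (1 : Int) [] = puzzle.getD 1 [] :=
    PySem.List.pyGetD_ofNat' puzzle 1 []
  have e2 : PySem.List.pyGetD puzzle (2 : Int) [] = puzzle.getD 2 [] :=
    PySem.List.pyGetD_ofNat' puzzle 2 []
  have e3 : PySem.List.pyGetD puzzle (3 : Int) [] = puzzle.getD 3 [] :=
    PySem.List.pyGetD_ofNat' puzzle 3 []
  interval_cases i
  · rw [pv_outer_step _ _ _ _ rfl, e0, pv_inner_find 0 _ [] hfind, pv_outer_skip]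
    simp
  · have hp0 := hprev 0 (by omega)
    rw [pv_outer_step _ _ _ _ rfl, e0, pv_inner_pass 0 _ [] hp0.1 hp0.2,
        pv_outer_step _ _ _ _ rfl, e1, pv_inner_find 1 _ [] hfind, pv_outer_skip]
    simp
  · have hp0 := hprev 0 (by omega); have hp1 := hprev 1 (by omega)
    rw [pv_outer_step _ _ _ _ rfl, e0, pv_inner_pass 0 _ [] hp0.1 hp0.2,
        pv_outer_step _ _ _ _ rfl, e1, pv_inner_pass 1 _ [] hp1.1 hp1.2,
        pv_outer_step _ _ _ _ rfl, e2, pv_inner_find 2 _ [] hfind, pv_outer_skip]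
    simp
  · have hp0 := hprev 0 (by omega); have hp1 := hprev 1 (by omega); have hp2 := hprev 2 (by omega)
    rw [pv_outer_step _ _ _ _ rfl, e0, pv_inner_pass 0 _ [] hp0.1 hp0.2,
        pv_outer_step _ _ _ _ rfl, e1, pv_inner_pass 1 _ [] hp1.1 hp1.2,
        pv_outer_step _ _ _ _ rfl, e2, pv_inner_pass 2 _ [] hp2.1 hp2.2,
        pv_outer_step _ _ _ _ rfl, e3, pv_inner_find 3 _ [] hfind]
    simp [pfOuter]

-- B's left flag (head-cell test) agrees with A's j = 0 test
theorem pv_left_flag (row : List Int) (hmem : (0 : Int) ∈ row.take 4) :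
    (if row[0]?.getD 0 = 0 then (0 : Int) else 1) =
    (if List.idxOf 0 (row.take 4) = 0 then 0 else 1) := by
  have hlt : List.idxOf 0 (row.take 4) < (row.take 4).length := List.idxOf_lt_length_of_mem hmem
  have h0 : 0 < (row.take 4).length := by omega
  have h0r : 0 < row.length := lt_of_lt_of_le h0 (by simp [List.length_take])
  have he : row[0]?.getD 0 = (row.take 4)[0]'h0 := by
    rw [List.getElem?_eq_getElem h0r, Option.getD_some]
    exact (List.getElem_take).symm
  by_cases hj : List.idxOf 0 (row.take 4) = 0
  · have hz : (row.take 4)[(0 : Nat)]'h0 = 0 := by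
      have h := List.getElem_idxOf hlt
      simpa [hj] using h
    rw [he, if_pos hz, if_pos hj]
  · have hne : (row.take 4)[(0 : Nat)]'h0 ≠ 0 := pv_ne_of_lt_idxOf (by omega) h0
    rw [he, if_neg hne, if_neg hj]

-- B's right flag (0 within the first three cells) agrees with A's j = 3 test
theorem pv_right_flag (row : List Int) (hmem : (0 : Int) ∈ row.take 4) :
    (if (0 : Int) ∈ (row.take 4).take 3 then (1 : Int) else 0) =
    (if List.idxOf 0 (row.take 4) = 3 then 0 else 1) := by
  have hlt : List.idxOf 0 (row.take 4) < (row.take 4).length := List.idxOf_lt_length_of_mem hmem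
  have h4 : List.idxOf 0 (row.take 4) < 4 := lt_of_lt_of_le hlt (by simp [List.length_take])
  by_cases hj : List.idxOf 0 (row.take 4) = 3
  · have hnot : (0 : Int) ∉ (row.take 4).take 3 := by
      intro hm
      obtain ⟨k, hk, he⟩ := List.getElem_of_mem hm
      have hk3 : k < 3 := by simp [List.length_take] at hk; omega
      have : ((row.take 4).take 3)[k] = (row.take 4)[k]'(by omega) := List.getElem_take
      exact pv_ne_of_lt_idxOf (by omega) (by omega) (this ▸ he)
    rw [if_neg hnot, if_pos hj]
  · have hk3 : List.idxOf 0 (row.take 4) < 3 := by omega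
    have hmem3 : (0 : Int) ∈ (row.take 4).take 3 := by
      have hkl : List.idxOf 0 (row.take 4) < ((row.take 4).take 3).length := by
        simp only [List.length_take] at hlt ⊢
        omega
      have : ((row.take 4).take 3)[List.idxOf 0 (row.take 4)] = (row.take 4)[List.idxOf 0 (row.take 4)] :=
        List.getElem_take
      rw [← List.getElem_idxOf hlt, ← this]
      exact List.getElem_mem hkl
    rw [if_pos hmem3, if_neg hj]

-- ===== VERDICT (by name: the statement is the Claim_ definition above) =====
theorem position_finding_spec : Claim_equal_position_finding := by
  intro puzzle f _hDom hPre
  unfold Spec_position_finding position_finding position_finding_alt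
  rcases hPre with ⟨i, hi, hil, hfind, hprev, hf⟩ | ⟨hlen, hpass, hf⟩
  · rw [pv_outer_main puzzle i hi hil hfind hprev]
    have hcf : ∀ r : List Int, (0 : Int) ∉ r.take 4 → (r.take 4).contains 0 = false := by
      intro r h; simpa [List.contains_eq_mem] using h
    have hct : ((puzzle.getD i []).take 4).contains 0 = true := by
      simpa [List.contains_eq_mem] using hfind
    interval_cases i
    · rcases puzzle with _ | ⟨r0, tl⟩
      · simp at hil
      · simp only [List.getD_cons_zero] at hfind hct
        simp [hfind, pv_left_flag r0 hfind, pv_right_flag r0 hfind]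
    · rcases puzzle with _ | ⟨r0, _ | ⟨r1, tl⟩⟩ <;> try simp at hil
      have hp0 := hprev 0 (by omega)
      simp only [List.getD_cons_zero, List.getD_cons_succ] at hfind hct hp0
      have hc0 := hcf r0 hp0.2
      simp [hfind, hp0.2, pv_left_flag r1 hfind, pv_right_flag r1 hfind]
    · rcases puzzle with _ | ⟨r0, _ | ⟨r1, _ | ⟨r2, tl⟩⟩⟩ <;> try simp at hil
      have hp0 := hprev 0 (by omega); have hp1 := hprev 1 (by omega)
      simp only [List.getD_cons_zero, List.getD_cons_succ] at hfind hct hp0 hp1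
      have hc0 := hcf r0 hp0.2; have hc1 := hcf r1 hp1.2
      simp [hfind, hp0.2, hp1.2, pv_left_flag r2 hfind, pv_right_flag r2 hfind]
    · rcases puzzle with _ | ⟨r0, _ | ⟨r1, _ | ⟨r2, _ | ⟨r3, tl⟩⟩⟩⟩ <;> try simp at hil
      have hp0 := hprev 0 (by omega); have hp1 := hprev 1 (by omega); have hp2 := hprev 2 (by omega)
      simp only [List.getD_cons_zero, List.getD_cons_succ] at hfind hct hp0 hp1 hp2
      have hc0 := hcf r0 hp0.2; have hc1 := hcf r1 hp1.2; have hc2 := hcf r2 hp2.2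
      simp [hfind, hp0.2, hp1.2, hp2.2, pv_left_flag r3 hfind, pv_right_flag r3 hfind]
  · have hp0 := hpass 0 (by omega); have hp1 := hpass 1 (by omega)
    have hp2 := hpass 2 (by omega); have hp3 := hpass 3 (by omega)
    have e0 : PySem.List.pyGetD puzzle (0 : Int) [] = puzzle.getD 0 [] :=
      PySem.List.pyGetD_ofNat' puzzle 0 []
    have e1 : PySem.List.pyGetD puzzle (1 : Int) [] = puzzle.getD 1 [] :=
      PySem.List.pyGetD_ofNat' puzzle 1 []
    have e2 : PySem.List.pyGetD puzzle (2 : Int) [] = puzzle.getD 2 [] :=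
      PySem.List.pyGetD_ofNat' puzzle 2 []
    have e3 : PySem.List.pyGetD puzzle (3 : Int) [] = puzzle.getD 3 [] :=
      PySem.List.pyGetD_ofNat' puzzle 3 []
    have hA : pfOuter puzzle [0, 1, 2, 3] ([], false) = ([], false) := by
      rw [pv_outer_step _ _ _ _ rfl, e0, pv_inner_pass 0 _ [] hp0.1 hp0.2,
          pv_outer_step _ _ _ _ rfl, e1, pv_inner_pass 1 _ [] hp1.1 hp1.2,
          pv_outer_step _ _ _ _ rfl, e2, pv_inner_pass 2 _ [] hp2.1 hp2.2,
          pv_outer_step _ _ _ _ rfl, e3, pv_inner_pass 3 _ [] hp3.1 hp3.2]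
      rfl
    rcases puzzle with _ | ⟨r0, _ | ⟨r1, _ | ⟨r2, _ | ⟨r3, tl⟩⟩⟩⟩ <;> try simp at hlen
    simp only [List.getD_cons_zero, List.getD_cons_succ] at hp0 hp1 hp2 hp3
    have hcf : ∀ r : List Int, (0 : Int) ∉ r.take 4 → (r.take 4).contains 0 = false := by
      intro r h; simpa [List.contains_eq_mem] using h
    rw [hA]
    simp [hp0.2, hp1.2, hp2.2, hp3.2, show ¬ f ≥ 0 by omega]
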